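-- pv_equiv track=rewrite | github.com/skyg547/pythoncodingtest | Sort/BOJ10815-NumberCard.py | solution
-- ===== SOURCE A (Python) =====
-- def solution(nl, ml):
--     # 정답 배열
--     answer = [0] * (len(ml))
--
--     # 배열 정렬
--     nl.sort()
--
--     # 원소를 돌면서
--     for element in range(len(ml)):
--         left = 0
--         right = len(nl)-1
--
--         #왼쪽이 더 작을때만 반복을 하는데
--         while left <= right:
--             # 중앙값은 왼쪽 오른쪽 더해서 나누고
--             mid = (left + right) // 2
--
--             # 만약 그값과 일치한다면
--             if nl[mid] == ml[element]:
--                 # 인덱스를 조정해주고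
--                 answer[element] = 1
--                 # 탈출
--                 break
--
--             # 중압값 보다 크면 오른쪽 작게
--             elif nl[mid] > ml[element]:
--                 right = mid - 1
--             # 왼쪽 더해주기
--             else:
--                 left = mid + 1
--
--
--     # # 원소를 돌면서
--     # for element in ml:
--     #
--     #     a = 0
--     #     b = len(nl) // 2 - 1
--     #     # 엘리 먼트가 중앙 값보다 작으면
--     #     if element < nl[len(nl) // 2]:
--     #         # 앞쪽만 돈다
--     #         for i in range(a, len(nl) // 2):
--     #             if nl[i] == element:
--     #                 answer[ml.index(element)] = 1
--     #                 a = i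
--     #                 break
--     #     else:
--     #         for i in range(b, len(nl)):
--     #             if nl[i] == element:
--     #                 answer[ml.index(element)] = 1
--     #                 b = i
--     #                 break
--
--     return answer
-- ===== SOURCE B (Python) =====
-- def solution(nl, ml):
--     # Two-pointer merge over sorted queries instead of per-query binary search.
--     nl.sort()
--     answer = [0] * len(ml)
--     order = sorted(range(len(ml)), key=lambda i: ml[i])
--     j = 0
--     for i in order:
--         v = ml[i]
--         while j < len(nl) and nl[j] < v:
--             j += 1
--         if j < len(nl) and nl[j] == v:
--             answer[i] = 1
--     return answer
-- ===== Notes on version B (the rewrite author's own statement) =====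
-- stated objective: faster
-- what changed: Replaces A's per-query binary search over the sorted card list by a single two-pointer merge: the query indices are sorted by value and walked in one pass alongside the sorted card list, never advancing the card pointer past a possible match.
import Mathlib
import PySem

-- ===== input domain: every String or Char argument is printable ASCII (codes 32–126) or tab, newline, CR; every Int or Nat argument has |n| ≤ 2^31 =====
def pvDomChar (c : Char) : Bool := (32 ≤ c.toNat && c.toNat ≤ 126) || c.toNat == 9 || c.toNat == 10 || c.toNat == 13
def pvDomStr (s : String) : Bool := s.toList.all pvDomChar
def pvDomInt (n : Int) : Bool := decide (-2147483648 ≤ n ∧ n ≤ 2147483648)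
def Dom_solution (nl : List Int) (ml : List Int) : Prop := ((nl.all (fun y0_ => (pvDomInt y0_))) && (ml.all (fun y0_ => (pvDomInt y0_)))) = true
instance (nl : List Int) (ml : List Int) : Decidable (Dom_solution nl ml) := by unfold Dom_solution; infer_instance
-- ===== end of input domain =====

-- B replaces A's per-query binary search by one two-pointer merge over the queries
-- sorted by value (objective: alternative). A sorts nl in place; equivalence here is
-- about the RETURN value only (B performs the same in-place sort of nl).

-- ===== PORT A =====
-- A's inner while loop (binary search); the index mid is always in range when read
-- (0 ≤ left ≤ mid ≤ right < len), so the pyGetD default is unreachable.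
def solBS (s : List Int) (x : Int) (left right : Int) : Bool :=
  if h : left ≤ right then
    let mid := PySem.Int.floordiv (left + right) 2
    let v := PySem.List.pyGetD s mid 0
    if v = x then true
    else if v > x then solBS s x left (mid - 1)
    else solBS s x (mid + 1) right
  else false
termination_by (right + 1 - left).toNat
decreasing_by
  · have := PySem.Int.floordiv_two_mid_bounds h
    omega
  · have := PySem.Int.floordiv_two_mid_bounds h
    omega

def solution (nl : List Int) (ml : List Int) : List Int :=
  let s := PySem.List.sorted nl (fun x => x) false
  (PySem.List.pyRange 0 (ml.length : Int) 1).foldl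
    (fun answer element =>
      if solBS s (PySem.List.pyGetD ml element 0) 0 ((s.length : Int) - 1)
      then PySem.List.pySetD answer element 1 else answer)
    (List.replicate ml.length 0)

-- ===== PORT B =====
-- B's inner while loop: advance j past elements smaller than v (j starts at 0 and
-- only grows, so the pyGetD default for a negative index is unreachable).
def altSkip (s : List Int) (j : Int) (v : Int) : Int :=
  if h : j < (s.length : Int) ∧ PySem.List.pyGetD s j 0 < v then altSkip s (j + 1) v else j
termination_by ((s.length : Int) - j).toNat
decreasing_by omega

def solution_alt (nl : List Int) (ml : List Int) : List Int :=
  let s := PySem.List.sorted nl (fun x => x) false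
  let order := PySem.List.sorted (PySem.List.pyRange 0 (ml.length : Int) 1)
      (fun i => PySem.List.pyGetD ml i 0) false
  let r := order.foldl
    (fun (st : List Int × Int) i =>
      let v := PySem.List.pyGetD ml i 0
      let j := altSkip s st.2 v
      if j < (s.length : Int) ∧ PySem.List.pyGetD s j 0 = v
      then (PySem.List.pySetD st.1 i 1, j) else (st.1, j))
    (List.replicate ml.length 0, 0)
  r.1

-- ===== PRECONDITION & SPEC =====
def Spec_solution (nl : List Int) (ml : List Int) (out : List Int) : Prop := out = solution_alt nl ml
instance (nl : List Int) (ml : List Int) (out : List Int) : Decidable (Spec_solution nl ml out) := by unfold Spec_solution; infer_instance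

-- ===== CLAIM (what is proved, stated in full; the proofs are below) =====
def Claim_equal_solution : Prop := ∀ (nl : List Int) (ml : List Int), Dom_solution nl ml → Spec_solution nl ml (solution nl ml)

-- ===== LEMMAS AND PROOFS =====

lemma pvSorted_mono (s : List Int) (hs : s.Pairwise (· ≤ ·)) {i j : Nat}
    (hij : i ≤ j) (hj : j < s.length) : s[i] ≤ s[j] := by
  rcases Nat.lt_or_ge i j with h | h
  · exact List.pairwise_iff_getElem.mp hs i j (by omega) hj h
  · have hij' : i = j := by omega
    subst hij'; exact le_refl _

lemma pvBS_iff (s : List Int) (x : Int) (left right : Int) :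
    s.Pairwise (· ≤ ·) → 0 ≤ left → right < (s.length : Int) →
    (solBS s x left right = true ↔
      ∃ k : Nat, left ≤ (k : Int) ∧ (k : Int) ≤ right ∧ s[k]? = some x) := by
  induction left, right using solBS.induct (s := s) (x := x) with
  | case1 left right h mid v hveq =>
      intro hs h0 hr
      have hmideq : mid = PySem.Int.floordiv (left + right) 2 := rfl
      have hvdef : PySem.List.pyGetD s mid 0 = v := rfl
      have hmid : left ≤ mid ∧ mid ≤ right := by
        rw [hmideq]; exact PySem.Int.floordiv_two_mid_bounds h
      have hgetv : v = s[mid.toNat] := by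
        rw [← hvdef]; exact PySem.List.pyGetD_eq_getElem s 0 (by omega) (by omega)
      rw [solBS]
      simp only [dif_pos h, ← hmideq, hvdef]
      rw [if_pos hveq]
      constructor
      · intro _
        refine ⟨mid.toNat, by omega, by omega, ?_⟩
        rw [List.getElem?_eq_getElem (by omega)]
        rw [← hgetv, hveq]
      · intro _; rfl
  | case2 left right h mid v hne hgt ih =>
      intro hs h0 hr
      have hmideq : mid = PySem.Int.floordiv (left + right) 2 := rfl
      have hvdef : PySem.List.pyGetD s mid 0 = v := rfl
      have hmid : left ≤ mid ∧ mid ≤ right := by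
        rw [hmideq]; exact PySem.Int.floordiv_two_mid_bounds h
      have hgetv : v = s[mid.toNat] := by
        rw [← hvdef]; exact PySem.List.pyGetD_eq_getElem s 0 (by omega) (by omega)
      rw [solBS]
      simp only [dif_pos h, ← hmideq, hvdef]
      rw [if_neg hne, if_pos hgt]
      rw [ih hs h0 (by omega)]
      constructor
      · rintro ⟨k, hk1, hk2, hk3⟩
        exact ⟨k, hk1, by omega, hk3⟩
      · rintro ⟨k, hk1, hk2, hk3⟩
        refine ⟨k, hk1, ?_, hk3⟩
        by_contra hcon
        have hk : k < s.length := by omega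
        have hx : s[k] = x := by
          rw [List.getElem?_eq_getElem hk] at hk3; exact Option.some.inj hk3
        have hle : s[mid.toNat] ≤ s[k] := pvSorted_mono s hs (by omega) hk
        rw [← hgetv, hx] at hle
        omega
  | case3 left right h mid v hne hngt ih =>
      intro hs h0 hr
      have hmideq : mid = PySem.Int.floordiv (left + right) 2 := rfl
      have hvdef : PySem.List.pyGetD s mid 0 = v := rfl
      have hmid : left ≤ mid ∧ mid ≤ right := by
        rw [hmideq]; exact PySem.Int.floordiv_two_mid_bounds h
      have hgetv : v = s[mid.toNat] := by
        rw [← hvdef]; exact PySem.List.pyGetD_eq_getElem s 0 (by omega) (by omega)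
      have hvlt : v < x := by
        rcases lt_or_ge v x with h' | h'
        · exact h'
        · exact absurd (by omega : v > x ∨ v = x) (by simpa [hne] using hngt)
      rw [solBS]
      simp only [dif_pos h, ← hmideq, hvdef]
      rw [if_neg hne, if_neg hngt]
      rw [ih hs (by omega) hr]
      constructor
      · rintro ⟨k, hk1, hk2, hk3⟩
        exact ⟨k, by omega, hk2, hk3⟩
      · rintro ⟨k, hk1, hk2, hk3⟩
        refine ⟨k, ?_, hk2, hk3⟩
        by_contra hcon
        have hk : k < s.length := by omega
        have hx : s[k] = x := by
          rw [List.getElem?_eq_getElem hk] at hk3; exact Option.some.inj hk3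
        have hle : s[k] ≤ s[mid.toNat] := pvSorted_mono s hs (by omega) (by omega)
        rw [← hgetv, hx] at hle
        omega
  | case4 left right h =>
      intro hs h0 hr
      rw [solBS]
      simp only [dif_neg h]
      constructor
      · intro hf; simp at hf
      · rintro ⟨k, hk1, hk2, _⟩
        exact absurd (le_trans hk1 hk2) h

lemma pvBS_full (s : List Int) (x : Int) (hs : s.Pairwise (· ≤ ·)) :
    (solBS s x 0 ((s.length : Int) - 1) = true ↔ x ∈ s) := by
  rw [pvBS_iff s x 0 ((s.length : Int) - 1) hs (le_refl 0) (by omega)]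
  rw [List.mem_iff_getElem]
  constructor
  · rintro ⟨k, hk1, hk2, hk3⟩
    have hk : k < s.length := by omega
    exact ⟨k, hk, by rw [List.getElem?_eq_getElem hk] at hk3; exact Option.some.inj hk3⟩
  · rintro ⟨k, hk, hx⟩
    exact ⟨k, by omega, by omega, by rw [List.getElem?_eq_getElem hk, hx]⟩
-- ---- B side: the skip loop ----

lemma pvSkip_spec (s : List Int) (v : Int) (j : Int) :
    0 ≤ j → j ≤ (s.length : Int) →
    (∀ k : Nat, (k : Int) < j → s.getD k 0 < v) →
    (j ≤ altSkip s j v ∧ altSkip s j v ≤ (s.length : Int) ∧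
     (∀ k : Nat, (k : Int) < altSkip s j v → s.getD k 0 < v) ∧
     (altSkip s j v < (s.length : Int) → ¬ s.getD (altSkip s j v).toNat 0 < v)) := by
  induction j using altSkip.induct (s := s) (v := v) with
  | case1 j h ih =>
      intro h0 hle hpre
      rw [altSkip]
      rw [dif_pos h]
      have hget : PySem.List.pyGetD s j 0 = s.getD j.toNat 0 := by
        rw [PySem.List.pyGetD_eq_getElem s 0 h0 h.1]
        rw [List.getD_eq_getElem s 0 (by omega)]
      have hpre' : ∀ k : Nat, (k : Int) < j + 1 → s.getD k 0 < v := by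
        intro k hk
        rcases lt_or_ge (k : Int) j with h' | h'
        · exact hpre k h'
        · have : k = j.toNat := by omega
          rw [this, ← hget]; exact h.2
      obtain ⟨a, b, c, d⟩ := ih (by omega) (by omega) hpre'
      exact ⟨by omega, b, c, d⟩
  | case2 j h =>
      intro h0 hle hpre
      rw [altSkip]
      rw [dif_neg h]
      refine ⟨le_refl _, hle, hpre, ?_⟩
      intro hlt hcon
      apply h
      refine ⟨hlt, ?_⟩
      rw [PySem.List.pyGetD_eq_getElem s 0 h0 hlt]
      rw [← List.getD_eq_getElem s 0 (by omega)]
      exact hcon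

-- after the skip loop, the current cell matches v iff v occurs in s at all
lemma pvFound_iff (s : List Int) (hs : s.Pairwise (· ≤ ·)) (v j : Int)
    (h0 : 0 ≤ j) (hle : j ≤ (s.length : Int))
    (hpre : ∀ k : Nat, (k : Int) < j → s.getD k 0 < v)
    (hstop : j < (s.length : Int) → ¬ s.getD j.toNat 0 < v) :
    ((j < (s.length : Int) ∧ PySem.List.pyGetD s j 0 = v) ↔ v ∈ s) := by
  constructor
  · rintro ⟨hlt, heq⟩
    rw [PySem.List.pyGetD_eq_getElem s 0 h0 hlt] at heq
    rw [← heq]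
    exact List.getElem_mem _
  · intro hv
    obtain ⟨t, ht, hteq⟩ := List.mem_iff_getElem.mp hv
    have htj : j ≤ (t : Int) := by
      by_contra hcon
      have := hpre t (by omega)
      rw [List.getD_eq_getElem s 0 ht, hteq] at this
      omega
    have hjlt : j < (s.length : Int) := by omega
    refine ⟨hjlt, ?_⟩
    rw [PySem.List.pyGetD_eq_getElem s 0 h0 hjlt]
    have hmono : s[j.toNat] ≤ s[t] := pvSorted_mono s hs (by omega) ht
    have hge : ¬ s.getD j.toNat 0 < v := hstop hjlt
    rw [List.getD_eq_getElem s 0 (by omega)] at hge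
    rw [hteq] at hmono
    omega
-- ---- A side: the outer fold fills position p iff the binary search succeeds on p ----

lemma pvFoldA (c : Int → Bool) (m : Nat) (init : List Int) (hlen : init.length = m) :
    ∀ n : Nat, n ≤ m →
    (((PySem.List.pyRange 0 (n : Int) 1).foldl
        (fun ans e => if c e = true then PySem.List.pySetD ans e 1 else ans) init).length = m ∧
     ∀ p : Nat, p < m →
       ((PySem.List.pyRange 0 (n : Int) 1).foldl
          (fun ans e => if c e = true then PySem.List.pySetD ans e 1 else ans) init)[p]? =
         if p < n ∧ c (p : Int) = true then some 1 else init[p]?) := by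
  intro n
  induction n with
  | zero =>
      intro _
      rw [PySem.List.pyRange_one_eq_nil (by omega)]
      simp [hlen]
  | succ n ih =>
      intro hnm
      obtain ⟨L, P⟩ := ih (by omega)
      have hsplit : PySem.List.pyRange 0 ((n + 1 : Nat) : Int) 1 =
          PySem.List.pyRange 0 (n : Int) 1 ++ [(n : Int)] := by
        push_cast
        exact PySem.List.pyRange_one_succ_right (by omega)
      rw [hsplit, List.foldl_append]
      simp only [List.foldl_cons, List.foldl_nil]
      by_cases hc : c (n : Int) = true
      · rw [if_pos hc]
        rw [PySem.List.pySetD_natCast]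
        constructor
        · rw [List.length_set]; exact L
        · intro p hp
          rw [List.getElem?_set]
          by_cases hpn : p = n
          · subst hpn
            rw [if_pos rfl, L, if_pos hp, if_pos ⟨by omega, hc⟩]
          · rw [if_neg (fun h => hpn h.symm), P p hp]
            by_cases hcp : p < n ∧ c (p : Int) = true
            · rw [if_pos hcp, if_pos ⟨by omega, hcp.2⟩]
            · rw [if_neg hcp, if_neg ?_]
              rintro ⟨h1, h2⟩
              exact hcp ⟨by omega, h2⟩
      · rw [if_neg hc]
        refine ⟨L, fun p hp => ?_⟩
        rw [P p hp]
        by_cases hcp : p < n ∧ c (p : Int) = true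
        · rw [if_pos hcp, if_pos ⟨by omega, hcp.2⟩]
        · rw [if_neg hcp, if_neg ?_]
          rintro ⟨h1, h2⟩
          by_cases hpn : p = n
          · subst hpn; exact hc h2
          · exact hcp ⟨by omega, h2⟩
-- ---- B side: the two-pointer fold fills position p iff its query value occurs in s ----

lemma pvFoldB (s ml : List Int) (hs : s.Pairwise (· ≤ ·)) :
    ∀ (os : List Int) (ans : List Int) (j : Int),
    os.Pairwise (fun a b => PySem.List.pyGetD ml a 0 ≤ PySem.List.pyGetD ml b 0) →
    (∀ i ∈ os, 0 ≤ i ∧ i < (ml.length : Int)) →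
    os.Nodup →
    0 ≤ j → j ≤ (s.length : Int) →
    (∀ i ∈ os, ∀ k : Nat, (k : Int) < j → s.getD k 0 < PySem.List.pyGetD ml i 0) →
    ans.length = ml.length →
    ((os.foldl
        (fun (st : List Int × Int) i =>
          let v := PySem.List.pyGetD ml i 0
          let j := altSkip s st.2 v
          if j < (s.length : Int) ∧ PySem.List.pyGetD s j 0 = v
          then (PySem.List.pySetD st.1 i 1, j) else (st.1, j)) (ans, j)).1.length = ml.length ∧
     ∀ p : Nat, p < ml.length →
       (os.foldl
          (fun (st : List Int × Int) i =>
            let v := PySem.List.pyGetD ml i 0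
            let j := altSkip s st.2 v
            if j < (s.length : Int) ∧ PySem.List.pyGetD s j 0 = v
            then (PySem.List.pySetD st.1 i 1, j) else (st.1, j)) (ans, j)).1[p]? =
         if (p : Int) ∈ os then
           (if ml.getD p 0 ∈ s then some 1 else ans[p]?)
         else ans[p]?) := by
  intro os
  induction os with
  | nil =>
      intro ans j _ _ _ _ _ _ hlen
      simp [hlen]
  | cons i os' ih =>
      intro ans j hpw hrange hnd h0 hle hpre hlen
      obtain ⟨hhead, hpw'⟩ := List.pairwise_cons.mp hpw
      obtain ⟨hind, hnd'⟩ := List.nodup_cons.mp hnd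
      obtain ⟨hi0, him⟩ := hrange i List.mem_cons_self
      obtain ⟨hj1ge, hj1le, hj1pre, hj1stop⟩ :=
        pvSkip_spec s (PySem.List.pyGetD ml i 0) j h0 hle (hpre i List.mem_cons_self)
      have hfound := pvFound_iff s hs (PySem.List.pyGetD ml i 0)
        (altSkip s j (PySem.List.pyGetD ml i 0)) (by omega) hj1le hj1pre hj1stop
      rw [List.foldl_cons]
      simp only []
      by_cases hv : PySem.List.pyGetD ml i 0 ∈ s
      · rw [if_pos (hfound.mpr hv)]
        obtain ⟨L, P⟩ := ih (PySem.List.pySetD ans i 1) (altSkip s j (PySem.List.pyGetD ml i 0))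
          hpw' (fun a ha => hrange a (List.mem_cons_of_mem _ ha)) hnd' (by omega) hj1le
          (fun a ha k hk => lt_of_lt_of_le (hj1pre k hk) (hhead a ha))
          (by rw [PySem.List.pySetD_of_nonneg ans 1 hi0, List.length_set]; exact hlen)
        refine ⟨L, fun p hp => ?_⟩
        rw [P p hp]
        have hset : PySem.List.pySetD ans i 1 = ans.set i.toNat 1 :=
          PySem.List.pySetD_of_nonneg ans 1 hi0
        by_cases hpo : (p : Int) ∈ os'
        · rw [if_pos hpo, if_pos (List.mem_cons_of_mem _ hpo)]
          have hpi : ¬ (p : Int) = i := fun h => hind (h ▸ hpo)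
          have hne : ¬ i.toNat = p := by omega
          rw [hset, List.getElem?_set, if_neg hne]
        · by_cases hpi : (p : Int) = i
          · have hptn : i.toNat = p := by omega
            rw [if_neg hpo, hset, List.getElem?_set, if_pos hptn, hptn, if_pos (by omega : p < ans.length)]
            have hkey : PySem.List.pyGetD ml (p : Int) 0 = ml.getD p 0 := by simp
            rw [if_pos (by rw [hpi]; exact List.mem_cons_self),
              if_pos (by rw [← hkey, hpi]; exact hv)]
          · rw [if_neg hpo, if_neg (by simp [hpi, hpo] : ¬ (p : Int) ∈ i :: os')]
            have hne : ¬ i.toNat = p := by omega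
            rw [hset, List.getElem?_set, if_neg hne]
      · rw [if_neg (fun hcon => hv (hfound.mp hcon))]
        obtain ⟨L, P⟩ := ih ans (altSkip s j (PySem.List.pyGetD ml i 0))
          hpw' (fun a ha => hrange a (List.mem_cons_of_mem _ ha)) hnd' (by omega) hj1le
          (fun a ha k hk => lt_of_lt_of_le (hj1pre k hk) (hhead a ha)) hlen
        refine ⟨L, fun p hp => ?_⟩
        rw [P p hp]
        by_cases hpo : (p : Int) ∈ os'
        · rw [if_pos hpo, if_pos (List.mem_cons_of_mem _ hpo)]
        · by_cases hpi : (p : Int) = i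
          · rw [if_neg hpo, if_pos (by rw [hpi]; exact List.mem_cons_self)]
            have hkey : PySem.List.pyGetD ml (p : Int) 0 = ml.getD p 0 := by simp
            rw [if_neg (by rw [← hkey, hpi]; exact hv)]
          · rw [if_neg hpo, if_neg (by simp [hpi, hpo] : ¬ (p : Int) ∈ i :: os')]
-- ---- characterizations: both programs compute the membership indicator ----

lemma pvA_char (nl ml : List Int) :
    (solution nl ml).length = ml.length ∧
    ∀ p : Nat, p < ml.length →
      (solution nl ml)[p]? =
        (if ml.getD p 0 ∈ PySem.List.sorted nl (fun x => x) false then (some 1 : Option Int)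
         else some 0) := by
  have hs : (PySem.List.sorted nl (fun x => x) false).Pairwise (· ≤ ·) := by
    simpa using PySem.List.sorted_pairwise nl (fun x => x)
  obtain ⟨L, P⟩ := pvFoldA
    (fun e => solBS (PySem.List.sorted nl (fun x => x) false) (PySem.List.pyGetD ml e 0) 0
        (((PySem.List.sorted nl (fun x => x) false).length : Int) - 1))
    ml.length (List.replicate ml.length 0) (by simp) ml.length (le_refl _)
  have hdef : solution nl ml =
      (PySem.List.pyRange 0 (ml.length : Int) 1).foldl
        (fun ans e =>
          if (fun e => solBS (PySem.List.sorted nl (fun x => x) false)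
                (PySem.List.pyGetD ml e 0) 0
                (((PySem.List.sorted nl (fun x => x) false).length : Int) - 1)) e = true
          then PySem.List.pySetD ans e 1 else ans)
        (List.replicate ml.length 0) := rfl
  refine ⟨by rw [hdef]; exact L, fun p hp => ?_⟩
  rw [hdef, P p hp, List.getElem?_replicate, if_pos hp]
  have hkey : PySem.List.pyGetD ml (p : Int) 0 = ml.getD p 0 := by simp
  rw [hkey]
  by_cases hmem : ml.getD p 0 ∈ PySem.List.sorted nl (fun x => x) false
  · rw [if_pos hmem, if_pos ⟨hp, (pvBS_full _ _ hs).mpr hmem⟩]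
  · rw [if_neg hmem, if_neg (fun hc => hmem ((pvBS_full _ _ hs).mp hc.2))]

lemma pvB_char (nl ml : List Int) :
    (solution_alt nl ml).length = ml.length ∧
    ∀ p : Nat, p < ml.length →
      (solution_alt nl ml)[p]? =
        (if ml.getD p 0 ∈ PySem.List.sorted nl (fun x => x) false then (some 1 : Option Int)
         else some 0) := by
  have hs : (PySem.List.sorted nl (fun x => x) false).Pairwise (· ≤ ·) := by
    simpa using PySem.List.sorted_pairwise nl (fun x => x)
  have hpw := PySem.List.sorted_pairwise (PySem.List.pyRange 0 (ml.length : Int) 1)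
    (fun i => PySem.List.pyGetD ml i 0)
  have hrange : ∀ i ∈ PySem.List.sorted (PySem.List.pyRange 0 (ml.length : Int) 1)
      (fun i => PySem.List.pyGetD ml i 0) false, 0 ≤ i ∧ i < (ml.length : Int) := by
    intro i hi
    rw [PySem.List.mem_sorted] at hi
    exact PySem.List.mem_pyRange_one.mp hi
  have hnodup : (PySem.List.sorted (PySem.List.pyRange 0 (ml.length : Int) 1)
      (fun i => PySem.List.pyGetD ml i 0) false).Nodup :=
    (PySem.List.sorted_perm _ _ _).nodup_iff.mpr (PySem.List.nodup_pyRange_one _ _)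
  obtain ⟨L, P⟩ := pvFoldB (PySem.List.sorted nl (fun x => x) false) ml hs
    (PySem.List.sorted (PySem.List.pyRange 0 (ml.length : Int) 1)
      (fun i => PySem.List.pyGetD ml i 0) false)
    (List.replicate ml.length 0) 0 hpw hrange hnodup (le_refl 0) (by omega)
    (fun i _ k hk => absurd hk (by omega)) (by simp)
  have hdef : solution_alt nl ml =
      ((PySem.List.sorted (PySem.List.pyRange 0 (ml.length : Int) 1)
          (fun i => PySem.List.pyGetD ml i 0) false).foldl
        (fun (st : List Int × Int) i =>
          let v := PySem.List.pyGetD ml i 0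
          let j := altSkip (PySem.List.sorted nl (fun x => x) false) st.2 v
          if j < ((PySem.List.sorted nl (fun x => x) false).length : Int) ∧
              PySem.List.pyGetD (PySem.List.sorted nl (fun x => x) false) j 0 = v
          then (PySem.List.pySetD st.1 i 1, j) else (st.1, j))
        (List.replicate ml.length 0, 0)).1 := rfl
  refine ⟨by rw [hdef]; exact L, fun p hp => ?_⟩
  have hmemo : (p : Int) ∈ PySem.List.sorted (PySem.List.pyRange 0 (ml.length : Int) 1)
      (fun i => PySem.List.pyGetD ml i 0) false := by
    rw [PySem.List.mem_sorted]
    exact PySem.List.mem_pyRange_one.mpr ⟨by omega, by omega⟩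
  rw [hdef, P p hp, if_pos hmemo, List.getElem?_replicate, if_pos hp]
lemma pvEq (nl ml : List Int) : solution nl ml = solution_alt nl ml := by
  obtain ⟨LA, PA⟩ := pvA_char nl ml
  obtain ⟨LB, PB⟩ := pvB_char nl ml
  apply List.ext_getElem?
  intro n
  by_cases hn : n < ml.length
  · rw [PA n hn, PB n hn]
  · rw [List.getElem?_eq_none (by omega), List.getElem?_eq_none (by omega)]

-- ===== VERDICT (by name: the statement is the Claim_ definition above) =====
theorem solution_spec : Claim_equal_solution := fun nl ml _ => pvEq nl ml
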